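-- pv_equiv track=rewrite | github.com/irgordon/koji | tools/abi/gen_abi.py | _c_alias_to_go
-- ===== SOURCE A (Python) =====
-- def _c_alias_to_go(c_name: str) -> str:
--     """koji_handle_t → Handle, koji_obj_type_t → ObjType"""
--     name = c_name
--     if name.startswith("koji_"):
--         name = name[5:]
--     if name.endswith("_t"):
--         name = name[:-2]
--     rename = {
--         "syscall": "SyscallNum",
--         "status":  "Status",
--     }
--     if name in rename:
--         return rename[name]
--     # CamelCase without underscores: obj_type → ObjType
--     return "".join(p.capitalize() for p in name.split("_"))
-- ===== SOURCE B (Python) =====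
-- def _c_alias_to_go(c_name: str) -> str:
--     """koji_handle_t → Handle, koji_obj_type_t → ObjType"""
--     name = c_name.removeprefix("koji_").removesuffix("_t")
--     special = {"syscall": "SyscallNum", "status": "Status"}.get(name)
--     if special is not None:
--         return special
--     # single pass over the characters instead of split/capitalize/join
--     out = []
--     cap_next = True
--     for ch in name:
--         if ch == "_":
--             cap_next = True
--         else:
--             out.append(ch.upper() if cap_next else ch.lower())
--             cap_next = False
--     return "".join(out)
-- ===== Notes on version B (the rewrite author's own statement) =====
-- stated objective: idiomatic
-- what changed: B strips the prefix/suffix with removeprefix/removesuffix and a dict .get, then builds the CamelCase name in a single character pass carrying a cap_next flag instead of split-on-underscore plus per-segment capitalize plus join.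
import Mathlib
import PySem

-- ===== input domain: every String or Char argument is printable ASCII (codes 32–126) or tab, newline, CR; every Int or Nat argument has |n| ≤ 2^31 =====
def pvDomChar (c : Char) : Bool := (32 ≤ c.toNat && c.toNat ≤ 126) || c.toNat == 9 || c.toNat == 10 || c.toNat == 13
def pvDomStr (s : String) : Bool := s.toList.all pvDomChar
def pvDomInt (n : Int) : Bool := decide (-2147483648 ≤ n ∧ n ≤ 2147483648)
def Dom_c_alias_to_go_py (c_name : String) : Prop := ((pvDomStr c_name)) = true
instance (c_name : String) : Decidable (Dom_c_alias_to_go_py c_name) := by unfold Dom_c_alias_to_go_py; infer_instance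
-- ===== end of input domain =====

-- B replaces split/capitalize/join with one character pass carrying a cap_next flag; same results, same cost (objective: alternative).

-- ===== PORT A =====
-- str.capitalize, ported by hand (PySem has no capitalize): exact on ASCII,
-- where Python's title-case/lower-case of the first/remaining chars are upperChar/lowerChar.
def pyCapitalize : List Char → List Char
  | [] => []
  | c :: t => PySem.Chars.upperChar c :: t.map PySem.Chars.lowerChar

def c_alias_to_go_py (c_name : String) : String :=
  let name := c_name
  let name := if PySem.Str.startswith name "koji_" then String.ofList (PySem.Chars.slice name.toList (some 5) none) else name
  let name := if PySem.Str.endswith name "_t" then String.ofList (PySem.Chars.slice name.toList none (some (-2))) else name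
  let rename : PySem.Dict String String := PySem.Dict.ofList [("syscall", "SyscallNum"), ("status", "Status")]
  -- 'if name in rename: return rename[name]' — membership test + guarded lookup = first match of get?
  match PySem.Dict.get? rename name with
  | some v => v
  | none => String.ofList (PySem.Chars.join [] ((PySem.Chars.splitOn name.toList ['_']).map pyCapitalize))

-- ===== PORT B =====
-- str.removeprefix / str.removesuffix, ported by hand (PySem has none): CPython returns
-- s[len(p):] / s[:-len(p)] when the prefix/suffix matches, else s unchanged — exact.
def pyRemoveprefix (s p : String) : String :=
  if PySem.Str.startswith s p then String.ofList (PySem.Chars.slice s.toList (some (PySem.Str.len p : Int)) none) else s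

def pyRemovesuffix (s p : String) : String :=
  if PySem.Str.endswith s p then String.ofList (PySem.Chars.slice s.toList none (some (-(PySem.Str.len p : Int)))) else s

-- B's loop over the characters with the cap_next flag, as structural recursion.
def camelGo : List Char → Bool → List Char
  | [], _ => []
  | c :: t, capNext =>
      if c = '_' then camelGo t true
      else (if capNext then PySem.Chars.upperChar c else PySem.Chars.lowerChar c) :: camelGo t false

def c_alias_to_go_py_alt (c_name : String) : String :=
  let name := pyRemovesuffix (pyRemoveprefix c_name "koji_") "_t"
  -- '{…}.get(name)' + 'if special is not None: return special'
  match PySem.Dict.get? (PySem.Dict.ofList [("syscall", "SyscallNum"), ("status", "Status")]) name with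
  | some v => v
  | none => String.ofList (camelGo name.toList true)

-- ===== PRECONDITION & SPEC =====
def Spec_c_alias_to_go_py (c_name : String) (out : String) : Prop := out = c_alias_to_go_py_alt c_name
instance (c_name : String) (out : String) : Decidable (Spec_c_alias_to_go_py c_name out) := by unfold Spec_c_alias_to_go_py; infer_instance

-- ===== CLAIM (what is proved, stated in full; the proofs are below) =====
def Claim_equal_c_alias_to_go_py : Prop := ∀ (c_name : String), Dom_c_alias_to_go_py c_name → Spec_c_alias_to_go_py c_name (c_alias_to_go_py c_name)

-- ===== LEMMAS AND PROOFS =====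

lemma join_nil_eq_flatten (parts : List (List Char)) :
    PySem.Chars.join [] parts = parts.flatten := by
  induction parts with
  | nil => simp [PySem.Chars.join, List.intercalate]
  | cons p ps ih =>
      cases ps with
      | nil => simp [PySem.Chars.join, List.intercalate]
      | cons q qs =>
          simp [PySem.Chars.join, List.intercalate] at ih ⊢
          simpa using ih

lemma cap_cons_append (d : Char) (t : List Char) (c : Char) :
    pyCapitalize ((d :: t) ++ [c]) = pyCapitalize (d :: t) ++ [PySem.Chars.lowerChar c] := by
  simp [pyCapitalize]

-- the loop invariant of splitOn.go, read through capitalize-and-concatenate, against camelGo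
lemma go_cap_flatten (l : List Char) : ∀ (fuel : Nat) (cur : List Char) (acc : List (List Char)),
    l.length < fuel →
    ((PySem.Chars.splitOn.go ['_'] fuel l cur acc).map pyCapitalize).flatten
      = ((acc.reverse.map pyCapitalize).flatten)
        ++ (if cur = [] then camelGo l true else pyCapitalize cur.reverse ++ camelGo l false) := by
  induction l with
  | nil =>
      intro fuel cur acc h
      cases fuel with
      | zero => omega
      | succ n =>
          simp [PySem.Chars.splitOn.go, camelGo]
          by_cases hc : cur = [] <;> simp [hc, pyCapitalize]
  | cons c t ih =>
      intro fuel cur acc h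
      cases fuel with
      | zero => omega
      | succ n =>
          by_cases hc : c = '_'
          · subst hc
            rw [show PySem.Chars.splitOn.go ['_'] (n+1) ('_' :: t) cur acc
                  = PySem.Chars.splitOn.go ['_'] n t [] (cur.reverse :: acc) by
                  simp [PySem.Chars.splitOn.go, List.isPrefixOf]]
            rw [ih n [] (cur.reverse :: acc) (by simpa using Nat.lt_of_succ_lt_succ h)]
            by_cases h0 : cur = [] <;>
              simp [h0, camelGo, pyCapitalize, List.append_assoc]
          · rw [show PySem.Chars.splitOn.go ['_'] (n+1) (c :: t) cur acc
                  = PySem.Chars.splitOn.go ['_'] n t (c :: cur) acc by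
                  simp only [PySem.Chars.splitOn.go, List.isPrefixOf]
                  rw [if_neg (by simp [Ne.symm hc])]]
            rw [ih n (c :: cur) acc (by simpa using Nat.lt_of_succ_lt_succ h),
                if_neg (by simp : ¬(c :: cur = []))]
            by_cases h0 : cur = []
            · subst h0
              simp [camelGo, hc, pyCapitalize]
            · obtain ⟨d, t', hd⟩ : ∃ d t', cur.reverse = d :: t' := by
                cases hr : cur.reverse with
                | nil => exact absurd (by simpa using congrArg List.reverse hr) h0
                | cons d t' => exact ⟨d, t', rfl⟩
              rw [if_neg h0]
              simp only [List.reverse_cons, hd, cap_cons_append, camelGo, if_neg hc]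
              simp [List.append_assoc]

lemma splitOn_cap_eq_camel (l : List Char) :
    ((PySem.Chars.splitOn l ['_']).map pyCapitalize).flatten = camelGo l true := by
  have := go_cap_flatten l (l.length + 1) [] [] (by omega)
  simpa [PySem.Chars.splitOn] using this

lemma branches_eq (rn : PySem.Dict String String) (nm : String) :
    (match PySem.Dict.get? rn nm with
     | some v => v
     | none => String.ofList (PySem.Chars.join [] ((PySem.Chars.splitOn nm.toList ['_']).map pyCapitalize)))
    = (match PySem.Dict.get? rn nm with
       | some v => v
       | none => String.ofList (camelGo nm.toList true)) := by
  cases h : PySem.Dict.get? rn nm with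
  | some v => rfl
  | none => simp [join_nil_eq_flatten, splitOn_cap_eq_camel]

-- ===== VERDICT (by name: the statement is the Claim_ definition above) =====
theorem c_alias_to_go_py_spec : Claim_equal_c_alias_to_go_py := by
  intro c_name _
  unfold Spec_c_alias_to_go_py
  exact branches_eq _ _
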